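-- pv_equiv track=rewrite | github.com/fderyckel/ifitwala_ed | ifitwala_ed/assessment/doctype/task_feedback_workspace/task_feedback_workspace.py | _unique_index_exists
-- ===== SOURCE A (Python) =====
-- def _unique_index_exists(rows, columns):
--     index_map = {}
--     for row in rows:
--         key_name = row.get("Key_name")
--         if not key_name:
--             continue
--         non_unique = row.get("Non_unique")
--         try:
--             non_unique = int(non_unique)
--         except Exception:
--             non_unique = 1
--         if non_unique != 0:
--             continue
--         index_map.setdefault(key_name, []).append(row)
--
--     for entries in index_map.values():
--         if _index_entries_match_columns(entries, columns):
--             return True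
--     return False
--
-- def _index_entries_match_columns(entries, columns):
--     ordered = sorted(entries, key=lambda row: int(row.get("Seq_in_index") or 0))
--     return [row.get("Column_name") for row in ordered] == columns
-- ===== SOURCE B (Python) =====
-- def _eligible(row):
--     # truthy Key_name and Non_unique that parses to int 0 (any parse failure means "not unique-capable")
--     if not row.get("Key_name"):
--         return False
--     try:
--         return int(row.get("Non_unique")) == 0
--     except Exception:
--         return False
--
--
-- def _unique_index_exists(rows, columns):
--     eligible = [row for row in rows if _eligible(row)]
--     keys = dict.fromkeys(row["Key_name"] for row in eligible)
--     return any(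
--         [row.get("Column_name")
--          for row in sorted((r for r in eligible if r["Key_name"] == k),
--                            key=lambda r: int(r.get("Seq_in_index") or 0))] == columns
--         for k in keys)
-- ===== Notes on version B (the rewrite author's own statement) =====
-- stated objective: alternative
-- what changed: Replaces the dict-of-lists built by setdefault/append plus a per-group helper with a filter comprehension, an ordered-dedup of key names, and one any(...) over per-key filtered-and-sorted scans; no grouping dict and no helper function remain.
import Mathlib
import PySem

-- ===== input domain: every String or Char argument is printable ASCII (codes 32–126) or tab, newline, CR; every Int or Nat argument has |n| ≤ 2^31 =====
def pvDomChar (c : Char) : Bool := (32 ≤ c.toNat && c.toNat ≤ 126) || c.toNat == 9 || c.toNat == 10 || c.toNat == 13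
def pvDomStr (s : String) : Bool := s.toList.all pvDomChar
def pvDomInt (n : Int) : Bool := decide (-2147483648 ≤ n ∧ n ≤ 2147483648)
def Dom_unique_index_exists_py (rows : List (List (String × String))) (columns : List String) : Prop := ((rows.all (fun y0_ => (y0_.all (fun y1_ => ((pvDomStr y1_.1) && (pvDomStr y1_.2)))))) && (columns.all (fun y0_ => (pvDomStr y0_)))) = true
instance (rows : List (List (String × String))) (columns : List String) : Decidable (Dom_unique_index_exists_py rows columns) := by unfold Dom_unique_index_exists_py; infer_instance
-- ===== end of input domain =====

-- B replaces A's setdefault/append grouping dict and helper with a filter comprehension, an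
-- ordered key dedup and one any(...) over per-key filtered-and-sorted scans (objective: alternative).

-- shared accessors (the same sub-expressions occur verbatim in both Pythons)
-- row.get(k): first-match lookup in the association list (Python dict)
def rget (row : List (String × String)) (k : String) : Option String :=
  (PySem.Dict.mk row).get? k

-- int(v) for v = row.get(...): none where Python raises (TypeError on None, ValueError on a bad string)
def pyIntOpt? (v : Option String) : Option Int :=
  match v with
  | none => none
  | some s => PySem.Int.ofStr? s

-- int(row.get("Seq_in_index") or 0): none exactly where the Python sort key raises ValueError
def seqOf (row : List (String × String)) : Option Int :=
  match rget row "Seq_in_index" with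
  | none => some 0
  | some s => if s == "" then some 0 else PySem.Int.ofStr? s

-- the sort key, total form; faithful on inputs admitted by Pre_ (where seqOf is some)
def seqKey (row : List (String × String)) : Int := (seqOf row).getD 0

-- ===== PORT A =====
def indexEntriesMatchColumns (entries : List (List (String × String))) (columns : List String) : Bool :=
  let ordered := PySem.List.sorted entries (fun row => seqKey row) false
  (ordered.map (fun row => rget row "Column_name")) == columns.map some

def unique_index_exists_py (rows : List (List (String × String))) (columns : List String) : Bool :=
  let indexMap : PySem.Dict String (List (List (String × String))) :=
    rows.foldl (fun d row =>
      match rget row "Key_name" with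
      | none => d
      | some keyName =>
        if keyName == "" then d
        else
          let nonUnique : Int := (pyIntOpt? (rget row "Non_unique")).getD 1
          if nonUnique != 0 then d
          else d.modify keyName [] (fun l => l ++ [row])) PySem.Dict.empty
  indexMap.values.any (fun entries => indexEntriesMatchColumns entries columns)

-- ===== PORT B =====
def eligibleB (row : List (String × String)) : Bool :=
  match rget row "Key_name" with
  | none => false
  | some keyName =>
    if keyName == "" then false
    else
      match pyIntOpt? (rget row "Non_unique") with
      | some n => n == 0
      | none => false

-- row["Key_name"]; total form — every eligible row has a non-empty "Key_name"
def keyOfB (row : List (String × String)) : String := (rget row "Key_name").getD ""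

def unique_index_exists_py_alt (rows : List (List (String × String))) (columns : List String) : Bool :=
  let eligible := rows.filter eligibleB
  let keys := PySem.List.dedup (eligible.map keyOfB)
  keys.any (fun k =>
    ((PySem.List.sorted (eligible.filter (fun r => keyOfB r == k)) (fun r => seqKey r) false).map
        (fun r => rget r "Column_name")) == columns.map some)

-- ===== PRECONDITION & SPEC =====
-- Pre_ excludes exactly the inputs where the Python A raises: an eligible row whose
-- "Seq_in_index" value is a non-empty string that int() cannot parse (ValueError in the sort key).
def Pre_unique_index_exists_py (rows : List (List (String × String))) (columns : List String) : Prop :=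
  ∀ row ∈ rows, eligibleB row = true → (seqOf row).isSome = true

instance (rows : List (List (String × String))) (columns : List String) : Decidable (Pre_unique_index_exists_py rows columns) := by
  unfold Pre_unique_index_exists_py; infer_instance

def pvWitness_unique_index_exists_py : (List (List (String × String))) × List String :=
  ([[("Key_name", "k"), ("Non_unique", "0"), ("Seq_in_index", "1"), ("Column_name", "a")]], ["a"])

def Spec_unique_index_exists_py (rows : List (List (String × String))) (columns : List String) (out : Bool) : Prop := out = unique_index_exists_py_alt rows columns
instance (rows : List (List (String × String))) (columns : List String) (out : Bool) : Decidable (Spec_unique_index_exists_py rows columns out) := by unfold Spec_unique_index_exists_py; infer_instance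

-- ===== CLAIM (what is proved, stated in full; the proofs are below) =====
def Claim_equal_unique_index_exists_py : Prop := ∀ (rows : List (List (String × String))) (columns : List String), Dom_unique_index_exists_py rows columns → Pre_unique_index_exists_py rows columns → Spec_unique_index_exists_py rows columns (unique_index_exists_py rows columns)

-- ===== LEMMAS AND PROOFS =====

-- A's loop body, with its filter conditions folded into the predicate eligibleB
theorem Abody_eq (d : PySem.Dict String (List (List (String × String)))) (row : List (String × String)) :
    (match rget row "Key_name" with
      | none => d
      | some keyName =>
        if keyName == "" then d
        else
          let nonUnique : Int := (pyIntOpt? (rget row "Non_unique")).getD 1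
          if nonUnique != 0 then d
          else d.modify keyName [] (fun l => l ++ [row])) =
    (if eligibleB row then d.modify (keyOfB row) [] (fun l => l ++ [row]) else d) := by
  unfold eligibleB keyOfB
  cases h : rget row "Key_name" with
  | none => simp
  | some keyName =>
    simp only [Option.getD_some]
    by_cases hk : keyName == ""
    · simp [hk]
    · simp only [hk]
      cases hn : pyIntOpt? (rget row "Non_unique") with
      | none => simp
      | some n =>
        by_cases hz : n = 0 <;> simp [hz]

theorem dedup_eq_ofList (xs : List String) : PySem.List.dedup xs = PySem.Set.ofList xs := rfl

-- the grouping dict's lookup: group of k = the eligible rows whose key is k, in order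
theorem getD_groups (E : List (List (String × String))) (k : String) :
    (E.foldl (fun d row => d.modify (keyOfB row) [] (fun l => l ++ [row]))
        (PySem.Dict.empty : PySem.Dict String (List (List (String × String))))).getD k [] =
      E.filter (fun r => keyOfB r == k) := by
  have hmap : E.foldl (fun d row => d.modify (keyOfB row) [] (fun l => l ++ [row]))
      (PySem.Dict.empty : PySem.Dict String (List (List (String × String)))) =
      (E.map (fun r => (keyOfB r, r))).foldl (fun d p => d.modify p.1 [] (fun l => l ++ [p.2]))
        PySem.Dict.empty := by
    rw [List.foldl_map]
  rw [hmap, PySem.Dict.getD_foldl_modify_append]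
  simp [List.filter_map, Function.comp_def]

-- ===== VERDICT (by name: the statement is the Claim_ definition above) =====
theorem unique_index_exists_py_spec : Claim_equal_unique_index_exists_py := by
  intro rows columns _hdom _hpre
  unfold Spec_unique_index_exists_py unique_index_exists_py unique_index_exists_py_alt
  rw [PySem.List.foldl_congr_mem _ _
      (fun d row => if eligibleB row then d.modify (keyOfB row) [] (fun l => l ++ [row]) else d) _
      (fun acc x _hx => Abody_eq acc x)]
  rw [PySem.List.foldl_if_eq_foldl_filter]
  set E := rows.filter eligibleB with hE
  set d := E.foldl (fun d row => d.modify (keyOfB row) [] (fun l => l ++ [row]))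
      (PySem.Dict.empty : PySem.Dict String (List (List (String × String)))) with hd
  have hkeys : d.keys = PySem.Set.ofList (E.map keyOfB) := by
    rw [hd, PySem.Dict.keys_foldl_modify_key E keyOfB [] (fun _ row => fun l => l ++ [row])]
    simp [PySem.Set.update_nil_left]
  have hnodup : d.keys.Nodup := by
    rw [hd]
    exact PySem.Dict.nodup_keys_foldl_modify_key E keyOfB [] (fun _ row => fun l => l ++ [row]) _
      (by simp)
  dsimp only
  rw [PySem.Dict.values_eq_map_keys d hnodup [], List.any_map, hkeys, dedup_eq_ofList]
  apply PySem.List.any_congr_mem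
  intro k _hk
  simp only [Function.comp_apply, indexEntriesMatchColumns]
  rw [hd, getD_groups E k]
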